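-- pv_equiv track=rewrite | github.com/RoshnikRahat/TheDynamicNatureOfWebPages | iframes_1min/newiframe.py | extract_iframes
-- ===== SOURCE A (Python) =====
-- def extract_iframes(text):
--     """Extract iframes from the given text."""
--     if not isinstance(text, str):
--         raise ValueError("Input must be a string.")
--
--     iframes = []
--     # Assuming iframes are enclosed within <iframe> tags
--     start = text.find("<iframe")
--     while start != -1:
--         end = text.find("</iframe>", start)
--         if end != -1:
--             iframes.append(text[start:end + 9])  # Include the closing tag
--             start = text.find("<iframe", end)
--         else:
--             break
--     return iframes
-- ===== SOURCE B (Python) =====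
-- def extract_iframes(text):
--     """Extract iframes from the given text."""
--     if not isinstance(text, str):
--         raise ValueError("Input must be a string.")
--     parts = text.split("</iframe>")
--     return [p[p.find("<iframe"):] + "</iframe>" for p in parts[:-1] if "<iframe" in p]
-- ===== Notes on version B (the rewrite author's own statement) =====
-- stated objective: idiomatic
-- what changed: Replaces the manual while-loop with find-based index bookkeeping by a single split on the closing tag followed by a list comprehension over the chunks, with no index state at all.
import Mathlib
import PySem

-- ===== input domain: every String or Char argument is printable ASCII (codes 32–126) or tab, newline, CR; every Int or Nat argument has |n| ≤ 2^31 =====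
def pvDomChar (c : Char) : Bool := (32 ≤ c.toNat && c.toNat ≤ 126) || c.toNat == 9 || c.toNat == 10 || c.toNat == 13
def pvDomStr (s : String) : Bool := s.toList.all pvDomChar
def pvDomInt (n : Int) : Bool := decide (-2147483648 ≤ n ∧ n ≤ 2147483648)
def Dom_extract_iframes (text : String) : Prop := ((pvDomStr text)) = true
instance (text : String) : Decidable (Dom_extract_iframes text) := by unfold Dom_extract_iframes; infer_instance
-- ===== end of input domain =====

-- B replaces A's manual find/index while-loop by one split on "</iframe>" plus a comprehension (same cost, no index state).

-- ===== PORT A =====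
-- "<iframe" and "</iframe>" as character lists (both ports work on text.toList via PySem.Chars)
def pvOpen : List Char := ['<', 'i', 'f', 'r', 'a', 'm', 'e']
def pvClose : List Char := ['<', '/', 'i', 'f', 'r', 'a', 'm', 'e', '>']

-- A's while-loop; the fuel only makes the recursion total (length + 1 is never exhausted, as the proof shows)
def pvAgo (cs : List Char) (fuel : Nat) (start : Int) : List (List Char) :=
  match fuel with
  | 0 => []
  | fuel + 1 =>
    if start = -1 then []
    else
      let e := PySem.Chars.findFrom cs pvClose start
      if e = -1 then []
      else
        PySem.Chars.slice cs (some start) (some (e + 9)) ::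
          pvAgo cs fuel (PySem.Chars.findFrom cs pvOpen e)

def extract_iframes (text : String) : List String :=
  (pvAgo text.toList (text.toList.length + 1) (PySem.Chars.find text.toList pvOpen)).map
    String.ofList

-- ===== PORT B =====
-- p[p.find("<iframe"):] + "</iframe>"
def pvF (p : List Char) : List Char :=
  PySem.Chars.slice p (some (PySem.Chars.find p pvOpen)) none ++ pvClose

def extract_iframes_alt (text : String) : List String :=
  let parts := PySem.Chars.splitOn text.toList pvClose
  ((PySem.List.slice parts none (some (-1))).filter
      (fun p => PySem.Chars.isIn pvOpen p)).map (fun p => String.ofList (pvF p))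

-- ===== PRECONDITION & SPEC =====
def Spec_extract_iframes (text : String) (out : List String) : Prop := out = extract_iframes_alt text
instance (text : String) (out : List String) : Decidable (Spec_extract_iframes text out) := by unfold Spec_extract_iframes; infer_instance

-- ===== CLAIM (what is proved, stated in full; the proofs are below) =====
def Claim_equal_extract_iframes : Prop := ∀ (text : String), Dom_extract_iframes text → Spec_extract_iframes text (extract_iframes text)

-- ===== LEMMAS AND PROOFS =====

def pvSplit (cs : List Char) : List (List Char) :=
  match cs with
  | [] => [[]]
  | c :: rest =>
    if pvClose.isPrefixOf (c :: rest) then [] :: pvSplit ((c :: rest).drop 9)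
    else (pvSplit rest).modifyHead (c :: ·)
termination_by cs.length
decreasing_by all_goals simp [List.length_drop]
def pvScan (cs : List Char) : List (List Char) :=
  let i := PySem.Chars.find cs pvOpen
  if hi : i = -1 then []
  else
    let j := PySem.Chars.find (cs.drop i.toNat) pvClose
    if j = -1 then []
    else
      (cs.drop i.toNat).take (j.toNat + 9) ::
        pvScan (cs.drop (i.toNat + j.toNat + 9))
termination_by cs.length
decreasing_by
  have h7 : pvOpen <:+: cs := by
    have := PySem.Chars.find_eq_neg_one_iff cs pvOpen
    by_contra hc
    exact hi (this.mpr hc)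
  have := h7.length_le
  simp [pvOpen] at this
  simp [List.length_drop]; omega

theorem pv_find_eq (s sub : List Char) (e : Nat)
    (h1 : sub <+: s.drop e) (h2 : ∀ i < e, ¬ sub <+: s.drop i) :
    PySem.Chars.find s sub = e := by
  have hinf : sub <:+: s := h1.isInfix.trans (List.drop_suffix e s).isInfix
  have hnn : 0 ≤ PySem.Chars.find s sub := (PySem.Chars.find_nonneg_iff s sub).mpr hinf
  obtain ⟨hp, hmin⟩ := PySem.Chars.find_spec hnn
  set m := (PySem.Chars.find s sub).toNat with hm
  have h3 : ¬ m < e := fun hlt => h2 m hlt hp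
  have h4 : ¬ e < m := fun hlt => hmin e hlt h1
  have : m = e := by omega
  omega

theorem pv_clash (w : List Char) (k : Nat) (hk : k < 9) :
    ¬ pvOpen <+: (pvClose ++ w).drop k := by
  interval_cases k <;> simp [pvOpen, pvClose, List.cons_prefix_cons]

theorem pv_straddle (u w : List Char) (j : Nat) (hj : j < u.length) (hj7 : u.length < j + 7) :
    ¬ pvOpen <+: (u ++ (pvClose ++ w)).drop j := by
  intro h
  have hm : u.length - j < pvOpen.length := by simp [pvOpen]; omega
  have hlen : pvOpen.length ≤ ((u ++ (pvClose ++ w)).drop j).length := h.length_le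
  have hidx : j + (u.length - j) < (u ++ (pvClose ++ w)).length := by
    simp [List.length_append]; simp [pvClose]; omega
  have he : ((u ++ (pvClose ++ w)).drop j)[u.length - j]'(by simp [List.length_drop] at *; omega)
      = pvOpen[u.length - j] := (h.getElem hm).symm
  rw [List.getElem_drop] at he
  have hu : (u ++ (pvClose ++ w))[j + (u.length - j)]'hidx = '<' := by
    have : j + (u.length - j) = u.length := by omega
    simp [this, List.getElem_append_right, pvClose]
  rw [hu] at he
  obtain ⟨m, hmeq, hm1, hm6⟩ : ∃ m, u.length - j = m ∧ 1 ≤ m ∧ m ≤ 6 :=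
    ⟨_, rfl, by omega, by omega⟩
  simp only [hmeq] at he
  interval_cases m <;> simp [pvOpen] at he

theorem pv_occ (u w : List Char) (j : Nat) (h : pvOpen <+: (u ++ (pvClose ++ w)).drop j) :
    j + 7 ≤ u.length ∨ u.length + 9 ≤ j := by
  by_contra hc
  push Not at hc
  obtain ⟨hc1, hc2⟩ := hc
  by_cases hj : j < u.length
  · exact pv_straddle u w j hj (by omega) h
  · have hk : j - u.length < 9 := by omega
    have hdrop : (u ++ (pvClose ++ w)).drop j = (pvClose ++ w).drop (j - u.length) := by
      rw [List.drop_append]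
      simp [List.drop_eq_nil_of_le (by omega : u.length ≤ j)]
    rw [hdrop] at h
    exact pv_clash w (j - u.length) hk h

theorem pv_occ_left (u w : List Char) (j : Nat) (h7 : j + 7 ≤ u.length) :
    (pvOpen <+: (u ++ w).drop j ↔ pvOpen <+: u.drop j) := by
  have hdrop : (u ++ w).drop j = u.drop j ++ w := List.drop_append_of_le_length (by omega)
  rw [hdrop]
  constructor
  · intro h
    rw [List.prefix_iff_eq_take,
      List.take_append_of_le_length (by simp [List.length_drop, pvOpen]; omega)] at h
    rw [h]
    exact List.take_prefix _ _
  · intro h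
    exact h.trans (List.prefix_append _ _)

theorem pv_drop_close (w : List Char) (j : Nat) (hj : 9 ≤ j) :
    (pvClose ++ w).drop j = w.drop (j - 9) := by
  rw [List.drop_append]
  simp [pvClose, List.drop_eq_nil_of_le, hj]

theorem pv_find_after_close (w : List Char) :
    PySem.Chars.find (pvClose ++ w) pvOpen =
      if PySem.Chars.find w pvOpen = -1 then -1 else 9 + PySem.Chars.find w pvOpen := by
  by_cases hw : PySem.Chars.find w pvOpen = -1
  · rw [if_pos hw]
    rw [PySem.Chars.find_eq_neg_one_iff] at hw ⊢
    intro hinf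
    obtain ⟨j, hj⟩ := (PySem.Chars.exists_prefix_drop_iff_isIn pvOpen (pvClose ++ w)).mpr
      ((PySem.Chars.isIn_iff_infix _ _).mpr hinf)
    by_cases h9 : j < 9
    · exact pv_clash w j h9 hj
    · rw [pv_drop_close w j (by omega)] at hj
      exact hw (hj.isInfix.trans (List.drop_suffix _ w).isInfix)
  · rw [if_neg hw]
    have ht : 0 ≤ PySem.Chars.find w pvOpen := by
      have := PySem.Chars.neg_one_le_find w pvOpen
      omega
    obtain ⟨hp, hmin⟩ := PySem.Chars.find_spec ht
    set tN := (PySem.Chars.find w pvOpen).toNat with htn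
    have heq : PySem.Chars.find (pvClose ++ w) pvOpen = (9 + tN : Nat) := by
      apply pv_find_eq
      · rw [pv_drop_close w (9 + tN) (by omega)]
        simpa using hp
      · intro i hi hpre
        by_cases h9 : i < 9
        · exact pv_clash w i h9 hpre
        · rw [pv_drop_close w i (by omega)] at hpre
          exact hmin (i - 9) (by omega) hpre
    rw [heq]
    omega

theorem pv_shift9 (cs : List Char) (m : Nat) (h : pvClose <+: cs.drop m) :
    PySem.Chars.findFrom cs pvOpen (↑m) = PySem.Chars.findFrom cs pvOpen (↑(m + 9)) := by
  have hlen : m + 9 ≤ cs.length := by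
    have h1 := h.length_le
    simp [List.length_drop, pvClose] at h1
    omega
  obtain ⟨t, ht⟩ := h
  have htd : t = cs.drop (m + 9) := by
    have : (cs.drop m).drop 9 = t := by rw [← ht]; simp [pvClose]
    rw [← this, List.drop_drop]
  rw [PySem.Chars.findFrom_natCast cs pvOpen m (by omega),
      PySem.Chars.findFrom_natCast cs pvOpen (m + 9) hlen]
  rw [← ht, ← htd, pv_find_after_close t]
  by_cases hw : PySem.Chars.find t pvOpen = -1
  · simp [hw]
  · rw [if_neg hw, if_neg hw, if_neg (by have := PySem.Chars.neg_one_le_find t pvOpen; omega :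
      ¬ (9 + PySem.Chars.find t pvOpen = -1))]
    push_cast
    ring

theorem pvSplit_ne_nil (cs : List Char) : pvSplit cs ≠ [] := by
  induction cs using pvSplit.induct with
  | case1 => simp [pvSplit]
  | case2 c rest h ih => simp [pvSplit, h]
  | case3 c rest h ih =>
    simp only [pvSplit, if_neg h]
    cases hsp : pvSplit rest with
    | nil => exact absurd hsp ih
    | cons a l => simp [List.modifyHead]

theorem pvSplit_go (fuel : Nat) (cs cur : List Char) (acc : List (List Char))
    (h : cs.length < fuel) :
    PySem.Chars.splitOn.go pvClose fuel cs cur acc =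
      acc.reverse ++ (pvSplit cs).modifyHead (cur.reverse ++ ·) := by
  induction fuel generalizing cs cur acc with
  | zero => omega
  | succ fuel ih =>
    cases cs with
    | nil =>
      simp [PySem.Chars.splitOn.go, pvSplit]
    | cons c rest =>
      by_cases hp : pvClose.isPrefixOf (c :: rest)
      · rw [show PySem.Chars.splitOn.go pvClose (fuel+1) (c :: rest) cur acc =
            PySem.Chars.splitOn.go pvClose fuel (List.drop pvClose.length (c :: rest)) []
              (cur.reverse :: acc) by simp [PySem.Chars.splitOn.go, hp]]
        rw [ih _ _ _ (by simp [pvClose] at h ⊢; omega)]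
        simp only [pvSplit, if_pos hp]
        simp only [pvClose, List.modifyHead, List.reverse_cons, List.append_assoc,
          List.cons_append, List.nil_append, List.append_nil]
        cases hsp : pvSplit (List.drop 8 rest) <;> simp [hsp]
      · rw [show PySem.Chars.splitOn.go pvClose (fuel+1) (c :: rest) cur acc =
            PySem.Chars.splitOn.go pvClose fuel rest (c :: cur) acc by
              simp [PySem.Chars.splitOn.go, hp]]
        rw [ih _ _ _ (by simp at h ⊢; omega)]
        simp only [pvSplit, if_neg hp]
        cases hsp : pvSplit rest with
        | nil => exact absurd hsp (pvSplit_ne_nil rest)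
        | cons a l => simp [List.modifyHead]

theorem pvSplitOn_eq (cs : List Char) : PySem.Chars.splitOn cs pvClose = pvSplit cs := by
  unfold PySem.Chars.splitOn
  rw [pvSplit_go (cs.length + 1) cs [] [] (by omega)]
  cases hsp : pvSplit cs with
  | nil => exact absurd hsp (pvSplit_ne_nil cs)
  | cons a l => simp [List.modifyHead]

theorem pvSplit_of_not_infix (cs : List Char) (h : ¬ pvClose <:+: cs) : pvSplit cs = [cs] := by
  induction cs using pvSplit.induct with
  | case1 => simp [pvSplit]
  | case2 c rest hp ih =>
    exact absurd ((List.isPrefixOf_iff_prefix.mp hp).isInfix) h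
  | case3 c rest hp ih =>
    rw [pvSplit, if_neg hp, ih (fun hi => h (hi.trans (List.suffix_cons c rest).isInfix))]
    simp [List.modifyHead]

theorem pvSplit_first (e : Nat) (cs : List Char)
    (h1 : pvClose <+: cs.drop e) (h2 : ∀ i < e, ¬ pvClose <+: cs.drop i) :
    pvSplit cs = cs.take e :: pvSplit (cs.drop (e + 9)) := by
  induction e generalizing cs with
  | zero =>
    rw [List.drop_zero] at h1
    cases cs with
    | nil => simp [pvClose] at h1
    | cons c rest =>
      rw [pvSplit, if_pos (List.isPrefixOf_iff_prefix.mpr h1)]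
      simp
  | succ e ih =>
    cases cs with
    | nil => simp at h1; exact absurd h1 (by simp [pvClose])
    | cons c rest =>
      have hp : ¬ pvClose.isPrefixOf (c :: rest) := by
        intro hp
        exact h2 0 (by omega) (by simpa using List.isPrefixOf_iff_prefix.mp hp)
      rw [pvSplit, if_neg hp]
      rw [ih rest (by simpa using h1) (fun i hi hpre => h2 (i + 1) (by omega) (by simpa using hpre))]
      simp [List.modifyHead, List.take_succ_cons, List.drop_succ_cons]

theorem pvAgo_eq_scan (fuel : Nat) (cs : List Char) (s : Nat)
    (hs : s ≤ cs.length) (hf : cs.length - s < fuel) :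
    pvAgo cs fuel (PySem.Chars.findFrom cs pvOpen (↑s)) = pvScan (cs.drop s) := by
  induction fuel generalizing s with
  | zero => omega
  | succ fuel ih =>
    rw [PySem.Chars.findFrom_natCast cs pvOpen s hs]
    by_cases hi : PySem.Chars.find (cs.drop s) pvOpen = -1
    · rw [if_pos hi, pvAgo, pvScan]
      simp [hi]
    · rw [if_neg hi]
      have hi0 : 0 ≤ PySem.Chars.find (cs.drop s) pvOpen := by
        have := PySem.Chars.neg_one_le_find (cs.drop s) pvOpen
        omega
      obtain ⟨hpO, hminO⟩ := PySem.Chars.find_spec hi0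
      set iN := (PySem.Chars.find (cs.drop s) pvOpen).toNat with hiN
      have hilen : s + iN + 7 ≤ cs.length := by
        have := hpO.length_le
        simp [List.length_drop, pvOpen] at this
        omega
      have hcast : (↑s + PySem.Chars.find (cs.drop s) pvOpen : Int) = ↑(s + iN) := by omega
      rw [hcast, pvAgo]
      rw [if_neg (by omega : ¬ ((↑(s + iN) : Int) = -1))]
      have hdd : cs.drop (s + iN) = (cs.drop s).drop iN := by
        rw [List.drop_drop, Nat.add_comm]
      by_cases hj : PySem.Chars.find ((cs.drop s).drop iN) pvClose = -1
      · have he : PySem.Chars.findFrom cs pvClose ↑(s + iN) = -1 := by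
          rw [PySem.Chars.findFrom_natCast cs pvClose (s + iN) (by omega), hdd, if_pos hj]
        rw [he]
        have hj2 : PySem.Chars.find (cs.drop (s + iN)) pvClose = -1 := by
          rw [hdd]; exact hj
        conv_rhs => rw [pvScan]
        simp [hi, hj2, ← hiN]
      · have hj0 : 0 ≤ PySem.Chars.find ((cs.drop s).drop iN) pvClose := by
          have := PySem.Chars.neg_one_le_find ((cs.drop s).drop iN) pvClose
          omega
        obtain ⟨hpC, hminC⟩ := PySem.Chars.find_spec hj0
        set jN := (PySem.Chars.find ((cs.drop s).drop iN) pvClose).toNat with hjN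
        have he : PySem.Chars.findFrom cs pvClose ↑(s + iN) = ↑(s + iN + jN) := by
          rw [PySem.Chars.findFrom_natCast cs pvClose (s + iN) (by omega), hdd, if_neg hj]
          omega
        rw [he]
        have hpC' : pvClose <+: cs.drop (s + iN + jN) := by
          have h0 := hpC
          rw [List.drop_drop, List.drop_drop] at h0
          rw [show s + iN + jN = s + (iN + jN) by omega]
          exact h0
        have hjlen : s + iN + jN + 9 ≤ cs.length := by
          have := hpC'.length_le
          simp [List.length_drop, pvClose] at this
          omega
        rw [if_neg (by omega : ¬ ((↑(s + iN + jN) : Int) = -1))]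
        -- head
        have hhead : PySem.Chars.slice cs (some ↑(s + iN)) (some ((↑(s + iN + jN) : Int) + 9)) =
            ((cs.drop s).drop iN).take (jN + 9) := by
          rw [show ((↑(s + iN + jN) : Int) + 9) = ((s + iN + jN + 9 : Nat) : Int) by omega,
            PySem.Chars.slice_eq_listSlice, PySem.List.slice_natCast, hdd]
          congr 1
          omega
        rw [hhead]
        -- tail
        rw [pv_shift9 cs (s + iN + jN) hpC']
        rw [ih (s + iN + jN + 9) (by omega) (by omega)]
        -- unfold the right-hand pvScan
        conv_rhs => rw [pvScan]
        simp only [dif_neg hi, if_neg hj, ← hiN, ← hjN]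
        congr 1
        rw [List.drop_drop]
        congr 1
        rw [show s + iN + jN + 9 = s + (iN + jN + 9) by omega]

theorem pv_drop_right (u v : List Char) (j : Nat) (h : u.length + 9 ≤ j) :
    (u ++ (pvClose ++ v)).drop j = v.drop (j - u.length - 9) := by
  rw [List.drop_append, List.drop_eq_nil_of_le (by omega), List.nil_append,
    pv_drop_close v (j - u.length) (by omega)]

theorem pv_find_drop (s sub : List Char) (eN i : Nat)
    (he : PySem.Chars.find s sub = eN) (hi : i ≤ eN) :
    PySem.Chars.find (s.drop i) sub = ((eN - i : Nat) : Int) := by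
  have h0 : 0 ≤ PySem.Chars.find s sub := by rw [he]; positivity
  obtain ⟨hp, hmin⟩ := PySem.Chars.find_spec h0
  rw [he] at hp hmin
  simp only [Int.toNat_natCast] at hp hmin
  apply pv_find_eq
  · rw [List.drop_drop, show i + (eN - i) = eN by omega]
    exact hp
  · intro k hk hpre
    rw [List.drop_drop] at hpre
    exact hmin (i + k) (by omega) hpre

theorem pvScan_eq_split (cs : List Char) :
    pvScan cs = ((pvSplit cs).dropLast.filter (fun p => PySem.Chars.isIn pvOpen p)).map pvF := by
  suffices H : ∀ n (cs : List Char), cs.length ≤ n →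
      pvScan cs = ((pvSplit cs).dropLast.filter (fun p => PySem.Chars.isIn pvOpen p)).map pvF from
    H cs.length cs le_rfl
  intro n
  induction n with
  | zero =>
    intro cs hlen
    have hcs : cs = [] := List.length_eq_zero_iff.mp (by omega)
    subst hcs
    rw [pvScan]
    simp [pvSplit, PySem.Chars.find, PySem.Chars.find.go, pvOpen]
  | succ n ih =>
    intro cs hlen
    by_cases hC : PySem.Chars.find cs pvClose = -1
    · have hninf := (PySem.Chars.find_eq_neg_one_iff cs pvClose).mp hC
      rw [pvSplit_of_not_infix cs hninf]
      rw [pvScan]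
      by_cases hi : PySem.Chars.find cs pvOpen = -1
      · simp [hi]
      · have hj : PySem.Chars.find (cs.drop (PySem.Chars.find cs pvOpen).toNat) pvClose = -1 := by
          rw [PySem.Chars.find_eq_neg_one_iff]
          intro hinf
          exact hninf (hinf.trans (List.drop_suffix _ cs).isInfix)
        simp [hi, hj]
    · have hC0 : 0 ≤ PySem.Chars.find cs pvClose := by
        have := PySem.Chars.neg_one_le_find cs pvClose
        omega
      obtain ⟨hpC, hminC⟩ := PySem.Chars.find_spec hC0
      set eN := (PySem.Chars.find cs pvClose).toNat with heN
      have hsplit := pvSplit_first eN cs hpC hminC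
      set u := cs.take eN with hu
      set v := cs.drop (eN + 9) with hv
      have hlen9 : eN + 9 ≤ cs.length := by
        have := hpC.length_le
        simp [List.length_drop, pvClose] at this
        omega
      have hulen : u.length = eN := by simp [hu, List.length_take]; omega
      have hucv : cs = u ++ (pvClose ++ v) := by
        obtain ⟨t, ht⟩ := hpC
        have ht2 : t = v := by
          have h9 : (cs.drop eN).drop 9 = t := by rw [← ht]; simp [pvClose]
          rw [← h9, List.drop_drop]
        have : u ++ (pvClose ++ v) = cs := by rw [← ht2, ht, hu, List.take_append_drop]
        exact this.symm
      have hvlen : v.length ≤ n := by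
        simp [hv, List.length_drop]
        omega
      have hIH := ih v hvlen
      rw [hsplit, List.dropLast_cons_of_ne_nil (pvSplit_ne_nil v)]
      rw [List.filter_cons]
      by_cases hOu : PySem.Chars.isIn pvOpen u = true
      · -- first iframe opening is inside u
        have hinfOu : pvOpen <:+: u := (PySem.Chars.isIn_iff_infix _ _).mp hOu
        have hOu0 : 0 ≤ PySem.Chars.find u pvOpen :=
          (PySem.Chars.find_nonneg_iff u pvOpen).mpr hinfOu
        obtain ⟨hpO, hminO⟩ := PySem.Chars.find_spec hOu0
        set iN := (PySem.Chars.find u pvOpen).toNat with hiN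
        have hi7 : iN + 7 ≤ eN := by
          have := hpO.length_le
          simp [List.length_drop, pvOpen] at this
          omega
        have hfind : PySem.Chars.find cs pvOpen = (iN : Int) := by
          rw [hucv]
          apply pv_find_eq
          · exact (pv_occ_left u (pvClose ++ v) iN (by omega)).mpr hpO
          · intro k hk hpre
            rcases pv_occ u v k hpre with h | h
            · exact hminO k hk ((pv_occ_left u (pvClose ++ v) k h).mp hpre)
            · omega
        rw [pvScan]
        simp only [hfind, Int.toNat_natCast]
        rw [dif_neg (by omega : ¬((iN : Int) = -1))]
        have hjfind : PySem.Chars.find (cs.drop iN) pvClose = ((eN - iN : Nat) : Int) :=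
          pv_find_drop cs pvClose eN iN (by omega) (by omega)
        rw [hjfind]
        rw [if_neg (by omega : ¬(((eN - iN : Nat) : Int) = -1))]
        simp only [Int.toNat_natCast]
        have hdropi : cs.drop iN = u.drop iN ++ (pvClose ++ v) := by
          rw [hucv, List.drop_append_of_le_length (by omega)]
        have hhead : (cs.drop iN).take (eN - iN + 9) = u.drop iN ++ pvClose := by
          rw [hdropi, ← List.append_assoc, List.take_left' (by
            simp [List.length_drop, pvClose]
            omega)]
        rw [hhead]
        rw [show iN + (eN - iN) + 9 = eN + 9 by omega]
        rw [← hv, hIH]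
        rw [if_pos hOu, List.map_cons]
        congr 1
        rw [pvF, PySem.Chars.slice_eq_listSlice, PySem.List.slice_from u hOu0]
      · -- no iframe opening inside u
        rw [if_neg hOu, ← hIH]
        have hnou : ∀ k, ¬ pvOpen <+: u.drop k := by
          intro k hk
          exact hOu ((PySem.Chars.exists_prefix_drop_iff_isIn pvOpen u).mp ⟨k, hk⟩)
        by_cases hOv : PySem.Chars.find v pvOpen = -1
        · have hfc : PySem.Chars.find cs pvOpen = -1 := by
            rw [PySem.Chars.find_eq_neg_one_iff]
            intro hinf
            obtain ⟨j, hj⟩ := (PySem.Chars.exists_prefix_drop_iff_isIn pvOpen cs).mpr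
              ((PySem.Chars.isIn_iff_infix _ _).mpr hinf)
            rw [hucv] at hj
            rcases pv_occ u v j hj with h | h
            · exact hnou j ((pv_occ_left u (pvClose ++ v) j h).mp hj)
            · rw [pv_drop_right u v j h] at hj
              exact (PySem.Chars.find_eq_neg_one_iff v pvOpen).mp hOv
                (hj.isInfix.trans (List.drop_suffix _ v).isInfix)
          rw [pvScan]
          conv_rhs => rw [pvScan]
          simp [hfc, hOv]
        · have hOv0 : 0 ≤ PySem.Chars.find v pvOpen := by
            have := PySem.Chars.neg_one_le_find v pvOpen
            omega
          obtain ⟨hpOv, hminOv⟩ := PySem.Chars.find_spec hOv0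
          set ivN := (PySem.Chars.find v pvOpen).toNat with hivN
          have hfind : PySem.Chars.find cs pvOpen = ((eN + 9 + ivN : Nat) : Int) := by
            rw [hucv]
            apply pv_find_eq
            · rw [pv_drop_right u v (eN + 9 + ivN) (by omega),
                show eN + 9 + ivN - u.length - 9 = ivN by omega]
              exact hpOv
            · intro k hk hpre
              rcases pv_occ u v k hpre with h | h
              · exact hnou k ((pv_occ_left u (pvClose ++ v) k h).mp hpre)
              · rw [pv_drop_right u v k h] at hpre
                exact hminOv (k - u.length - 9) (by omega) hpre
          rw [pvScan]
          conv_rhs => rw [pvScan]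
          simp only [hfind, Int.toNat_natCast]
          rw [dif_neg (by omega : ¬(((eN + 9 + ivN : Nat) : Int) = -1)), dif_neg hOv]
          have hdp : cs.drop (eN + 9 + ivN) = v.drop ivN := by
            rw [hucv, pv_drop_right u v _ (by omega),
              show eN + 9 + ivN - u.length - 9 = ivN by omega]
          rw [hdp]
          simp only [← hivN]
          by_cases hjv : PySem.Chars.find (v.drop ivN) pvClose = -1
          · simp [hjv]
          · simp only [if_neg hjv]
            congr 1
            rw [hucv, pv_drop_right u v _ (by omega)]
            rw [show eN + 9 + ivN + (PySem.Chars.find (List.drop ivN v) pvClose).toNat + 9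
                - u.length - 9 = ivN + (PySem.Chars.find (List.drop ivN v) pvClose).toNat + 9
                from by omega]

-- ===== VERDICT (by name: the statement is the Claim_ definition above) =====
theorem extract_iframes_spec : Claim_equal_extract_iframes := by
  intro text _
  unfold Spec_extract_iframes extract_iframes extract_iframes_alt
  rw [← PySem.Chars.findFrom_zero, show (0 : Int) = ((0 : Nat) : Int) from rfl,
    pvAgo_eq_scan (text.toList.length + 1) text.toList 0 (by omega) (by omega),
    List.drop_zero, pvScan_eq_split, pvSplitOn_eq]
  simp only [PySem.List.slice_to_neg_one, List.map_map]
  rfl
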